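-- pv_equiv track=rewrite | github.com/Gimilov/DPV-algorithms-practice-tool | student_solutions/dpv_6_19.py | solution
-- ===== SOURCE A (Python) =====
-- def solution(args: tuple) -> bool:
--     denominations, k, v = args
--
--     n = len(denominations)
--     S = [[None] * (v+1) for _ in range(k+1)]
--
--     for i in range(k+1):
--         S[i][0] = True
--     for j in range(1, v+1):
--         S[0][j] = False
--
--     for i in range(1, k+1):
--         for j in range(1, v+1):
--             S[i][j] = False
--             for l in range(n):
--                 if j >= denominations[l] and S[i-1][j-denominations[l]]:
--                     S[i][j] = True
--                     break
--
--     return S[k][v]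
-- ===== SOURCE B (Python) =====
-- def solution(args: tuple) -> bool:
--     denominations, k, v = args
--
--     # Forward reachability over values instead of a (k+1)x(v+1) table:
--     # 'reachable' holds every value writable as a sum of at most <iteration> coins,
--     # with early exit once v is reachable and a fixpoint break when the set stops growing.
--     reachable = {0}
--     for _ in range(k):
--         if v in reachable:
--             return True
--         nxt = reachable | {r + d for r in reachable for d in denominations if r + d <= v}
--         if len(nxt) == len(reachable):
--             break
--         reachable = nxt
--     return v in reachable
-- ===== Notes on version B (the rewrite author's own statement) =====
-- stated objective: alternative
-- what changed: Replaces the bottom-up (k+1)x(v+1) boolean table with a forward-reachability set of attainable values (at most i coins after i rounds), with an early exit when v becomes reachable and a fixpoint break when the set stops growing.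
-- outside the precondition, e.g. on solution(([1, -1], 1, 1)): A returns True, B returns True
import Mathlib
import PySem

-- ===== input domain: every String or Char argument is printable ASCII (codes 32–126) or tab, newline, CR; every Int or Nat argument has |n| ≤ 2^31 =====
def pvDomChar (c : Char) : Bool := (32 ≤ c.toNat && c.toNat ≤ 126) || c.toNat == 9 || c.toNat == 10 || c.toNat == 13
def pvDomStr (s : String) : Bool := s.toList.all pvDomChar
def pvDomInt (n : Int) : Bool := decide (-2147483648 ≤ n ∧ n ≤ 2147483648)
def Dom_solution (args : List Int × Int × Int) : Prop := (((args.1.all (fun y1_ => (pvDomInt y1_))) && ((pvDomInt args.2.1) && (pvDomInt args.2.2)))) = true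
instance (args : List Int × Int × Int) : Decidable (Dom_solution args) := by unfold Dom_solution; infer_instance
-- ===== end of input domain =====

-- B replaces A's bottom-up (k+1)x(v+1) table with a forward-reachability set of attainable values
-- (early exit / fixpoint break); equivalence is about the return value (neither mutates its input).

-- ===== PORT A =====
-- The table is a List of rows of 'Option Bool' (Python's None cells are 'none'); cell reads/writes
-- use the total pyGetD/pySetD forms, exact for the nonnegative in-range indices reached inside Pre_.
def pvCell (S : List (List (Option Bool))) (i j : Int) : Option Bool :=
  PySem.List.pyGetD (PySem.List.pyGetD S i []) j none

def pvSetCell (S : List (List (Option Bool))) (i j : Int) (x : Option Bool) :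
    List (List (Option Bool)) :=
  PySem.List.pySetD S i (PySem.List.pySetD (PySem.List.pyGetD S i []) j x)

-- the inner 'for l in range(n): if j >= denominations[l] and S[i-1][j-denominations[l]]: …; break',
-- iterating the denominations ds[0], ds[1], … directly; None is falsy, so the cell is read with getD false
def pvInner (S : List (List (Option Bool))) (i j : Int) : List Int → List (List (Option Bool))
  | [] => S
  | d :: rest =>
    if decide (d ≤ j) && (pvCell S (i - 1) (j - d)).getD false then pvSetCell S i j (some true)
    else pvInner S i j rest

def solution (args : List Int × Int × Int) : Bool :=
  match args with
  | (denominations, k, v) =>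
    let S0 := (PySem.List.pyRange 0 (k + 1) 1).map
      (fun _ => List.replicate (v + 1).toNat (none : Option Bool))
    let S1 := (PySem.List.pyRange 0 (k + 1) 1).foldl (fun S i => pvSetCell S i 0 (some true)) S0
    let S2 := (PySem.List.pyRange 1 (v + 1) 1).foldl (fun S j => pvSetCell S 0 j (some false)) S1
    let S3 := (PySem.List.pyRange 1 (k + 1) 1).foldl (fun S i =>
        (PySem.List.pyRange 1 (v + 1) 1).foldl (fun S j =>
          pvInner (pvSetCell S i j (some false)) i j denominations) S) S2
    (pvCell S3 k v).getD false

-- ===== PORT B =====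
-- nxt = reachable | {r + d for r in reachable for d in denominations if r + d <= v}
def pvStep (ds : List Int) (v : Int) (r : PySem.Set Int) : PySem.Set Int :=
  r.foldl (fun acc x =>
    ds.foldl (fun acc d => if x + d ≤ v then PySem.Set.add acc (x + d) else acc) acc) r

-- the 'for _ in range(k)' loop with its early return and fixpoint break
def pvLoop (ds : List Int) (v : Int) : Nat → PySem.Set Int → Bool
  | 0, r => PySem.Set.contains r v
  | n + 1, r =>
    if PySem.Set.contains r v then true
    else
      let nxt := pvStep ds v r
      if nxt.length = r.length then PySem.Set.contains r v
      else pvLoop ds v n nxt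

def solution_alt (args : List Int × Int × Int) : Bool :=
  match args with
  | (denominations, k, v) => pvLoop denominations v k.toNat (PySem.Set.ofList [0])

-- ===== PRECONDITION & SPEC =====
-- Pre_ excludes negative k or v, where A raises IndexError, and — when k ≥ 1 and v ≥ 1 — lists
-- containing a negative denomination: there A's read S[i-1][j-d] overruns the row (IndexError) on
-- most inputs and A returns a value only when an earlier coin's break accidentally pre-empts the
-- out-of-range read (e.g. ([1, -1], 1, 1), on which A and B both return True).
def Pre_solution (args : List Int × Int × Int) : Prop :=
  0 ≤ args.2.1 ∧ 0 ≤ args.2.2 ∧ (args.2.1 = 0 ∨ args.2.2 = 0 ∨ ∀ d ∈ args.1, 0 ≤ d)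
instance (args : List Int × Int × Int) : Decidable (Pre_solution args) := by
  unfold Pre_solution; infer_instance

def pvWitness_solution : (List Int × Int × Int) := ([1, 2], 2, 3)

def Spec_solution (args : List Int × Int × Int) (out : Bool) : Prop := out = solution_alt args
instance (args : List Int × Int × Int) (out : Bool) : Decidable (Spec_solution args out) := by
  unfold Spec_solution; infer_instance

-- ===== CLAIM (what is proved, stated in full; the proofs are below) =====
def Claim_equal_solution : Prop :=
  ∀ (args : List Int × Int × Int), Dom_solution args → Pre_solution args →
    Spec_solution args (solution args)

-- ===== LEMMAS AND PROOFS =====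

-- the shared recurrence: pvRec ds i j ↔ A's table cell S[i][j] (for 0 ≤ j ≤ v)
def pvRec (ds : List Int) : Nat → Int → Bool
  | 0, j => j == 0
  | n + 1, j => if j == 0 then true else ds.any (fun d => decide (d ≤ j) && pvRec ds n (j - d))

-- Nat-indexed views of the table operations
def cellN (S : List (List (Option Bool))) (a b : Nat) : Option Bool :=
  (S.getD a []).getD b none

def setN (S : List (List (Option Bool))) (a b : Nat) (x : Option Bool) :
    List (List (Option Bool)) :=
  S.set a ((S.getD a []).set b x)

def pvWF (S : List (List (Option Bool))) (K V : Nat) : Prop :=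
  S.length = K ∧ ∀ r ∈ S, r.length = V

lemma pvRec_zero_val (ds : List Int) (n : Nat) : pvRec ds n 0 = true := by
  cases n <;> simp [pvRec]

lemma pvCell_nn (S : List (List (Option Bool))) (i j : Int) (hi : 0 ≤ i) (hj : 0 ≤ j) :
    pvCell S i j = cellN S i.toNat j.toNat := by
  unfold pvCell cellN
  rw [← Int.toNat_of_nonneg hi, ← Int.toNat_of_nonneg hj]
  simp only [PySem.List.pyGetD_natCast, Int.toNat_natCast]

lemma pvSetCell_nn (S : List (List (Option Bool))) (i j : Int) (x : Option Bool)
    (hi : 0 ≤ i) (hj : 0 ≤ j) : pvSetCell S i j x = setN S i.toNat j.toNat x := by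
  unfold pvSetCell setN
  rw [← Int.toNat_of_nonneg hi, ← Int.toNat_of_nonneg hj]
  simp only [PySem.List.pySetD_natCast, PySem.List.pyGetD_natCast, Int.toNat_natCast]

lemma wf_setN {S : List (List (Option Bool))} {K V : Nat} (h : pvWF S K V) (a b : Nat)
    (x : Option Bool) : pvWF (setN S a b x) K V := by
  obtain ⟨h1, h2⟩ := h
  by_cases haS : a < S.length
  case neg =>
    rw [setN, List.set_eq_of_length_le (by omega)]
    exact ⟨h1, h2⟩
  case pos =>
    have hrow : (S.getD a []).length = V := by
      simp [List.getD, List.getElem?_eq_getElem haS, h2 _ (List.getElem_mem haS)]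
    refine ⟨by simp [setN, h1], ?_⟩
    intro r hr
    rcases List.mem_or_eq_of_mem_set hr with h | h
    · exact h2 r h
    · rw [h, List.length_set, hrow]

lemma cellN_setN {S : List (List (Option Bool))} {K V : Nat} (h : pvWF S K V)
    (a b : Nat) (ha : a < K) (hb : b < V) (x : Option Bool) (a' b' : Nat) :
    cellN (setN S a b x) a' b' = if a' = a ∧ b' = b then x else cellN S a' b' := by
  obtain ⟨h1, h2⟩ := h
  unfold cellN setN
  have haS : a < S.length := by omega
  have hrow : (S.getD a []).length = V := by
    simp [List.getD, List.getElem?_eq_getElem haS, h2 _ (List.getElem_mem haS)]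
  simp only [List.getD_eq_getElem?_getD]
  have router : (S.set a ((S[a]?.getD []).set b x))[a']? =
      if a = a' then some ((S[a]?.getD []).set b x) else S[a']? := by
    rw [List.getElem?_set]
    split_ifs with g1 g2 <;> simp_all
  rw [router]
  have rinner : ((S[a]?.getD []).set b x)[b']? =
      if b = b' then some x else (S[a]?.getD [])[b']? := by
    rw [List.getElem?_set]
    split_ifs with g1 g2 <;>
      first | rfl | (exfalso; apply g2; rw [← List.getD_eq_getElem?_getD]; omega)
  by_cases hA : a' = a
  · rw [if_pos hA.symm]
    simp only [Option.getD_some]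
    rw [rinner]
    by_cases hB : b' = b
    · rw [if_pos hB.symm]; simp [hA, hB]
    · rw [if_neg (fun hc => hB hc.symm)]; simp [hA, hB]
  · rw [if_neg (fun hc => hA hc.symm)]
    simp [hA]

lemma row_setN_ne {S : List (List (Option Bool))} (a b : Nat) (x : Option Bool)
    (a' : Nat) (h : a' ≠ a) : (setN S a b x).getD a' [] = S.getD a' [] := by
  rw [setN, List.getD_eq_getElem?_getD, List.getElem?_set_ne (fun hc => h hc.symm)]
  rw [List.getD_eq_getElem?_getD]

lemma setN_setN {S : List (List (Option Bool))} (a b : Nat) (x y : Option Bool)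
    (ha : a < S.length) : setN (setN S a b x) a b y = setN S a b y := by
  simp [setN, List.getD, List.getElem?_set_self ha, List.set_set]

lemma wf_foldl {α : Type} (body : List (List (Option Bool)) → α → List (List (Option Bool)))
    (l : List α) {K V : Nat}
    (hb : ∀ S a, pvWF S K V → pvWF (body S a) K V) :
    ∀ S, pvWF S K V → pvWF (l.foldl body S) K V := by
  induction l with
  | nil => exact fun S h => h
  | cons a l ih => exact fun S h => ih _ (hb S a h)

-- phase 1: for i in range(k+1): S[i][0] = True
lemma phase1 {K V : Nat} (x : Option Bool) (hV : 0 < V) :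
    ∀ (n : Nat) (S : List (List (Option Bool))), pvWF S K V → n ≤ K →
    ∀ a b : Nat, a < K → b < V →
      cellN ((List.range n).foldl (fun S t => setN S t 0 x) S) a b =
        if a < n ∧ b = 0 then x else cellN S a b := by
  intro n
  induction n with
  | zero => intro S hwf hn a b ha hb; simp
  | succ n ih =>
    intro S hwf hn a b ha hb
    have hwf' : pvWF ((List.range n).foldl (fun S t => setN S t 0 x) S) K V :=
      wf_foldl _ _ (fun S t h => wf_setN h t 0 x) S hwf
    rw [List.range_succ, List.foldl_append, List.foldl_cons, List.foldl_nil]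
    rw [cellN_setN hwf' n 0 (by omega) hV x a b]
    rw [ih S hwf (by omega) a b ha hb]
    split_ifs <;> first | rfl | omega

-- phase 2: for j in range(1, v+1): S[0][j] = False
lemma phase2 {K V : Nat} (x : Option Bool) (hK : 0 < K) :
    ∀ (n : Nat) (S : List (List (Option Bool))), pvWF S K V → n < V →
    ∀ a b : Nat, a < K → b < V →
      cellN ((List.range n).foldl (fun S t => setN S 0 (1 + t) x) S) a b =
        if a = 0 ∧ 1 ≤ b ∧ b < 1 + n then x else cellN S a b := by
  intro n
  induction n with
  | zero => intro S hwf hn a b ha hb; simp; omega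
  | succ n ih =>
    intro S hwf hn a b ha hb
    have hwf' : pvWF ((List.range n).foldl (fun S t => setN S 0 (1 + t) x) S) K V :=
      wf_foldl _ _ (fun S t h => wf_setN h 0 (1 + t) x) S hwf
    rw [List.range_succ, List.foldl_append, List.foldl_cons, List.foldl_nil]
    rw [cellN_setN hwf' 0 (1 + n) hK (by omega) x a b]
    rw [ih S hwf (by omega) a b ha hb]
    split_ifs <;> first | rfl | omega

-- the inner break-loop is List.any
lemma pvInner_eq (S : List (List (Option Bool))) (i j : Int) (ds : List Int) :
    pvInner S i j ds =
      if ds.any (fun d => decide (d ≤ j) && (pvCell S (i - 1) (j - d)).getD false) then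
        pvSetCell S i j (some true)
      else S := by
  induction ds with
  | nil => simp [pvInner]
  | cons d rest ih =>
    rw [pvInner]
    by_cases h : (decide (d ≤ j) && (pvCell S (i - 1) (j - d)).getD false) = true
    · simp [h]
    · simp only [h, if_false, ih, List.any_cons]
      simp [h]

-- value written at (i, j): reads only row i-1
def pvF (ds : List Int) (S : List (List (Option Bool))) (i : Nat) (j : Int) : Bool :=
  ds.any (fun d => decide (d ≤ j) &&
    (PySem.List.pyGetD (S.getD (i - 1) []) (j - d) none).getD false)

lemma any_congr' (l : List Int) (p q : Int → Bool) (h : ∀ x ∈ l, p x = q x) :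
    l.any p = l.any q := by
  induction l with
  | nil => rfl
  | cons a l ih =>
    rw [List.any_cons, List.any_cons, h a List.mem_cons_self,
      ih (fun x hx => h x (List.mem_cons_of_mem a hx))]

-- one write of phase 3: S[i][j] = False; inner loop; net effect is one setN with the pvF value
lemma body_eq (ds : List Int) {K V : Nat} (i : Nat) (hi : 1 ≤ i) (hiK : i < K)
    (S : List (List (Option Bool))) (hwf : pvWF S K V) (j : Int) (hj1 : 1 ≤ j) :
    pvInner (pvSetCell S (i : Int) j (some false)) (i : Int) j ds =
      setN S i j.toNat (some (pvF ds S i j)) := by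
  rw [pvSetCell_nn S _ _ _ (by omega) (by omega), Int.toNat_natCast, pvInner_eq]
  have hrow : ∀ d : Int,
      pvCell (setN S i j.toNat (some false)) ((i : Int) - 1) (j - d) =
        PySem.List.pyGetD (S.getD (i - 1) []) (j - d) none := by
    intro d
    unfold pvCell
    rw [show ((i : Int) - 1) = ((i - 1 : Nat) : Int) by omega, PySem.List.pyGetD_natCast,
      row_setN_ne _ _ _ _ (by omega)]
  have hcond : (fun d => decide (d ≤ j) &&
        (pvCell (setN S i j.toNat (some false)) ((i : Int) - 1) (j - d)).getD false) =
      (fun d => decide (d ≤ j) &&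
        (PySem.List.pyGetD (S.getD (i - 1) []) (j - d) none).getD false) := by
    funext d; rw [hrow d]
  rw [hcond]
  by_cases hc : pvF ds S i j = true
  · rw [if_pos (by exact hc), hc]
    rw [pvSetCell_nn _ _ _ _ (by omega) (by omega), Int.toNat_natCast]
    exact setN_setN i j.toNat (some false) (some true)
      (by obtain ⟨h1, _⟩ := hwf; omega)
  · rw [if_neg (by exact hc)]
    rw [Bool.not_eq_true] at hc
    rw [hc]

-- one row of phase 3: for j in range(1, v+1): S[i][j] = …
lemma phase3row (ds : List Int) {K V : Nat} (i : Nat) (hi : 1 ≤ i) (hiK : i < K) :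
    ∀ (m : Nat) (S : List (List (Option Bool))), pvWF S K V → m < V →
      (∀ a : Nat, a ≠ i →
        (((List.range m).foldl
          (fun S (t : Nat) => pvInner (pvSetCell S (i : Int) (1 + (t : Int)) (some false))
            (i : Int) (1 + (t : Int)) ds) S).getD a []) = S.getD a []) ∧
      pvWF ((List.range m).foldl
          (fun S (t : Nat) => pvInner (pvSetCell S (i : Int) (1 + (t : Int)) (some false))
            (i : Int) (1 + (t : Int)) ds) S) K V ∧
      (∀ b : Nat, b < V →
        cellN ((List.range m).foldl
          (fun S (t : Nat) => pvInner (pvSetCell S (i : Int) (1 + (t : Int)) (some false))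
            (i : Int) (1 + (t : Int)) ds) S) i b =
          if 1 ≤ b ∧ b < 1 + m then some (pvF ds S i (b : Int)) else cellN S i b) := by
  intro m
  induction m with
  | zero =>
    intro S hwf hm
    refine ⟨fun a _ => by rw [List.range_zero, List.foldl_nil], ?_, fun b hb => ?_⟩
    · rw [List.range_zero, List.foldl_nil]; exact hwf
    · rw [List.range_zero, List.foldl_nil, if_neg (by omega)]
  | succ m ih =>
    intro S hwf hm
    obtain ⟨ihA, ihB, ihC⟩ := ih S hwf (by omega)
    rw [List.range_succ, List.foldl_append, List.foldl_cons, List.foldl_nil]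
    rw [body_eq ds i hi hiK _ ihB (1 + (m : Int)) (by omega)]
    have htn : (1 + (m : Int)).toNat = 1 + m := by omega
    have hFeq : pvF ds ((List.range m).foldl
        (fun S (t : Nat) => pvInner (pvSetCell S (i : Int) (1 + (t : Int)) (some false))
          (i : Int) (1 + (t : Int)) ds) S) i (1 + (m : Int)) = pvF ds S i (1 + (m : Int)) := by
      unfold pvF
      rw [ihA (i - 1) (by omega)]
    rw [htn, hFeq]
    refine ⟨?_, ?_, ?_⟩
    · intro a ha
      rw [row_setN_ne _ _ _ _ ha, ihA a ha]
    · exact wf_setN ihB i (1 + m) _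
    · intro b hb
      rw [cellN_setN ihB i (1 + m) hiK (by omega) _ i b, ihC b hb]
      by_cases hbm : b = 1 + m
      · rw [if_pos ⟨rfl, hbm⟩, if_pos (show 1 ≤ b ∧ b < 1 + (m + 1) by omega), hbm]
        norm_cast
      · rw [if_neg (fun hc => hbm hc.2)]
        split_ifs <;> first | rfl | omega

-- phase 3, all rows, assuming nonnegative denominations
lemma phase3 (ds : List Int) (hd : ∀ d ∈ ds, 0 ≤ d) {K V : Nat} (hV : 1 ≤ V) :
    ∀ (i : Nat) (S : List (List (Option Bool))), pvWF S K V → i < K →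
      (∀ a b : Nat, a < K → b < V →
        cellN S a b = if b = 0 then some true else if a = 0 then some false else none) →
      pvWF ((List.range i).foldl (fun S (t : Nat) =>
          (List.range (V - 1)).foldl
            (fun S (u : Nat) => pvInner (pvSetCell S (1 + (t : Int)) (1 + (u : Int)) (some false))
              (1 + (t : Int)) (1 + (u : Int)) ds) S) S) K V ∧
      (∀ a b : Nat, a < K → b < V →
        cellN ((List.range i).foldl (fun S (t : Nat) =>
          (List.range (V - 1)).foldl
            (fun S (u : Nat) => pvInner (pvSetCell S (1 + (t : Int)) (1 + (u : Int)) (some false))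
              (1 + (t : Int)) (1 + (u : Int)) ds) S) S) a b =
          if a ≤ i then some (pvRec ds a (b : Int))
          else if b = 0 then some true else if a = 0 then some false else none) := by
  intro i
  induction i with
  | zero =>
    intro S hwf hi hbase
    rw [List.range_zero, List.foldl_nil]
    refine ⟨hwf, fun a b ha hb => ?_⟩
    rw [hbase a b ha hb]
    by_cases ha0 : a = 0
    · subst ha0
      rw [if_pos (le_refl 0)]
      by_cases hb0 : b = 0 <;> simp [hb0, pvRec]
    · rw [if_neg (show ¬ a ≤ 0 by omega)]
  | succ i ih =>
    intro S hwf hI hbase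
    have hlt : i < K := by omega
    obtain ⟨ihWF, ihC⟩ := ih S hwf hlt hbase
    rw [List.range_succ, List.foldl_append, List.foldl_cons, List.foldl_nil]
    obtain ⟨rA, rB, rC⟩ := phase3row ds (i + 1) (by omega) (by omega) (V - 1)
      ((List.range i).foldl (fun S (t : Nat) =>
        (List.range (V - 1)).foldl
          (fun S (u : Nat) => pvInner (pvSetCell S (1 + (t : Int)) (1 + (u : Int)) (some false))
            (1 + (t : Int)) (1 + (u : Int)) ds) S) S) ihWF (by omega)
    have hcast : ((i + 1 : Nat) : Int) = 1 + (i : Int) := by push_cast; ring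
    simp only [hcast] at rA rB rC
    refine ⟨rB, fun a b ha hb => ?_⟩
    by_cases hai : a = i + 1
    · subst hai
      rw [rC b hb]
      by_cases hb0 : 1 ≤ b
      · rw [if_pos ⟨hb0, by omega⟩, if_pos (by omega)]
        congr 1
        unfold pvF
        rw [show i + 1 - 1 = i from rfl]
        have hany : ∀ d ∈ ds,
            (decide (d ≤ (b : Int)) &&
              (PySem.List.pyGetD (((List.range i).foldl (fun S (t : Nat) =>
                (List.range (V - 1)).foldl
                  (fun S (u : Nat) =>
                    pvInner (pvSetCell S (1 + (t : Int)) (1 + (u : Int)) (some false))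
                      (1 + (t : Int)) (1 + (u : Int)) ds) S) S).getD i [])
                ((b : Int) - d) none).getD false) =
            (decide (d ≤ (b : Int)) && pvRec ds i ((b : Int) - d)) := by
          intro d hdm
          by_cases hdb : d ≤ (b : Int)
          · have hd0 : 0 ≤ d := hd d hdm
            have h0 : 0 ≤ (b : Int) - d := by omega
            have hbd : ((b : Int) - d).toNat < V := by omega
            have hcell : PySem.List.pyGetD (((List.range i).foldl (fun S (t : Nat) =>
                (List.range (V - 1)).foldl
                  (fun S (u : Nat) =>
                    pvInner (pvSetCell S (1 + (t : Int)) (1 + (u : Int)) (some false))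
                      (1 + (t : Int)) (1 + (u : Int)) ds) S) S).getD i [])
                ((b : Int) - d) none =
                cellN ((List.range i).foldl (fun S (t : Nat) =>
                (List.range (V - 1)).foldl
                  (fun S (u : Nat) =>
                    pvInner (pvSetCell S (1 + (t : Int)) (1 + (u : Int)) (some false))
                      (1 + (t : Int)) (1 + (u : Int)) ds) S) S) i ((b : Int) - d).toNat := by
              rw [← Int.toNat_of_nonneg h0, PySem.List.pyGetD_natCast]
              rfl
            rw [hcell, ihC i ((b : Int) - d).toNat hlt hbd, if_pos (le_refl i),
              Int.toNat_of_nonneg h0]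
            rfl
          · rw [decide_eq_false hdb]
            rfl
        rw [any_congr' ds _ _ hany]
        simp only [pvRec]
        rw [if_neg (by simp; omega)]
      · rw [if_neg (by omega), ihC (i + 1) b (by omega) hb, if_neg (by omega), if_pos (by omega),
          if_pos (by omega)]
        rw [show b = 0 by omega]
        rw [show ((0 : Nat) : Int) = 0 from rfl, pvRec_zero_val]
    · have hrow := rA a hai
      have : cellN ((List.range (V - 1)).foldl
          (fun S (u : Nat) => pvInner (pvSetCell S (1 + (i : Int)) (1 + (u : Int)) (some false))
            (1 + (i : Int)) (1 + (u : Int)) ds)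
          ((List.range i).foldl (fun S (t : Nat) =>
            (List.range (V - 1)).foldl
              (fun S (u : Nat) => pvInner (pvSetCell S (1 + (t : Int)) (1 + (u : Int)) (some false))
                (1 + (t : Int)) (1 + (u : Int)) ds) S) S)) a b =
          cellN ((List.range i).foldl (fun S (t : Nat) =>
            (List.range (V - 1)).foldl
              (fun S (u : Nat) => pvInner (pvSetCell S (1 + (t : Int)) (1 + (u : Int)) (some false))
                (1 + (t : Int)) (1 + (u : Int)) ds) S) S) a b := by
        unfold cellN
        rw [hrow]
      rw [this, ihC a b ha hb]
      split_ifs <;> first | rfl | omega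

lemma foldl_pyRange0 {α : Type} (body : α → Int → α) (m : Int) (S : α) :
    (PySem.List.pyRange 0 m 1).foldl body S =
      (List.range m.toNat).foldl (fun S (t : Nat) => body S (t : Int)) S := by
  rw [PySem.List.pyRange_one, List.foldl_map]
  simp only [zero_add, sub_zero]

lemma foldl_pyRange1 {α : Type} (body : α → Int → α) (m : Int) (S : α) :
    (PySem.List.pyRange 1 m 1).foldl body S =
      (List.range (m - 1).toNat).foldl (fun S (t : Nat) => body S (1 + (t : Int))) S := by
  rw [PySem.List.pyRange_one, List.foldl_map]

lemma A_eq (ds : List Int) (k v : Int) (hk : 0 ≤ k) (hv : 0 ≤ v)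
    (hd : k = 0 ∨ v = 0 ∨ ∀ d ∈ ds, 0 ≤ d) :
    solution (ds, k, v) = pvRec ds k.toNat v := by
  have hK1 : (k + 1).toNat = k.toNat + 1 := by omega
  have hV1 : (v + 1).toNat = v.toNat + 1 := by omega
  simp only [solution, foldl_pyRange0, foldl_pyRange1, add_sub_cancel_right, hK1]
  have hbody1 : (fun (S : List (List (Option Bool))) (t : Nat) =>
      pvSetCell S (t : Int) 0 (some true)) = (fun S t => setN S t 0 (some true)) := by
    funext S t
    rw [pvSetCell_nn S _ _ _ (by omega) (by omega), Int.toNat_natCast]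
    rfl
  have hbody2 : (fun (S : List (List (Option Bool))) (t : Nat) =>
      pvSetCell S 0 (1 + (t : Int)) (some false)) = (fun S t => setN S 0 (1 + t) (some false)) := by
    funext S t
    rw [pvSetCell_nn S _ _ _ (by omega) (by omega),
      show ((0 : Int)).toNat = 0 from rfl, show (1 + (t : Int)).toNat = 1 + t by omega]
  rw [hbody1, hbody2]
  set S0 := (PySem.List.pyRange 0 (k + 1) 1).map
    (fun _ => List.replicate (v + 1).toNat (none : Option Bool)) with hS0def
  have hwf0 : pvWF S0 (k.toNat + 1) (v.toNat + 1) := by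
    constructor
    · rw [hS0def, List.length_map, PySem.List.length_pyRange_one]
      omega
    · intro r hr
      obtain ⟨_, _, rfl⟩ := List.mem_map.mp hr
      rw [List.length_replicate]
      omega
  have hcell0 : ∀ a b : Nat, cellN S0 a b = none := by
    intro a b
    unfold cellN
    by_cases haS : a < S0.length
    · have hrow : S0.getD a [] = List.replicate (v + 1).toNat none := by
        rw [List.getD_eq_getElem?_getD, List.getElem?_eq_getElem haS]
        simp only [Option.getD_some, hS0def, List.getElem_map]
      rw [hrow, List.getD_eq_getElem?_getD, List.getElem?_replicate]
      split_ifs <;> rfl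
    · have hrow : S0.getD a [] = [] := by
        rw [List.getD_eq_getElem?_getD, List.getElem?_eq_none (by omega)]
        rfl
      rw [hrow]
      rfl
  have hwf1 : pvWF ((List.range (k.toNat + 1)).foldl (fun S t => setN S t 0 (some true)) S0)
      (k.toNat + 1) (v.toNat + 1) :=
    wf_foldl _ _ (fun S t h => wf_setN h t 0 _) S0 hwf0
  have h1 : ∀ a b : Nat, a < k.toNat + 1 → b < v.toNat + 1 →
      cellN ((List.range (k.toNat + 1)).foldl (fun S t => setN S t 0 (some true)) S0) a b =
        if b = 0 then some true else none := by
    intro a b ha hb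
    rw [phase1 (some true) (by omega) (k.toNat + 1) S0 hwf0 (le_refl _) a b ha hb, hcell0]
    split_ifs <;> first | rfl | omega
  set S1 := (List.range (k.toNat + 1)).foldl (fun S t => setN S t 0 (some true)) S0 with hS1def
  have hwf2 : pvWF ((List.range v.toNat).foldl (fun S t => setN S 0 (1 + t) (some false)) S1)
      (k.toNat + 1) (v.toNat + 1) :=
    wf_foldl _ _ (fun S t h => wf_setN h 0 (1 + t) _) S1 hwf1
  have hbase : ∀ a b : Nat, a < k.toNat + 1 → b < v.toNat + 1 →
      cellN ((List.range v.toNat).foldl (fun S t => setN S 0 (1 + t) (some false)) S1) a b =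
        if b = 0 then some true else if a = 0 then some false else none := by
    intro a b ha hb
    rw [phase2 (some false) (by omega) v.toNat S1 hwf1 (by omega) a b ha hb]
    by_cases hc : a = 0 ∧ 1 ≤ b ∧ b < 1 + v.toNat
    · rw [if_pos hc, if_neg (by omega), if_pos hc.1]
    · rw [if_neg hc, h1 a b ha hb]
      split_ifs <;> first | rfl | omega
  set S2 := (List.range v.toNat).foldl (fun S t => setN S 0 (1 + t) (some false)) S1 with hS2def
  rcases hd with h | h | h
  · -- k = 0: the outer loop is empty
    subst h
    rw [show ((0 : Int)).toNat = 0 from rfl] at *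
    rw [List.range_zero, List.foldl_nil, pvCell_nn _ _ _ (by omega) hv,
      show ((0 : Int)).toNat = 0 from rfl, hbase 0 v.toNat (by omega) (by omega)]
    by_cases hv0 : v = 0
    · subst hv0
      rw [if_pos (by omega : (0 : Int).toNat = 0)]
      rfl
    · rw [if_neg (by omega), if_pos rfl]
      simp only [pvRec]
      rw [Option.getD_some]
      simp [hv0]
  · -- v = 0: every row pass is empty
    subst h
    rw [show ((0 : Int)).toNat = 0 from rfl] at *
    simp only [List.range_zero, List.foldl_nil]
    rw [List.foldl_fixed, pvCell_nn _ _ _ hk (by omega),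
      show ((0 : Int)).toNat = 0 from rfl, hbase k.toNat 0 (by omega) (by omega),
      if_pos rfl, pvRec_zero_val]
    rfl
  · obtain ⟨_, h3⟩ := phase3 ds h (by omega : 1 ≤ v.toNat + 1) k.toNat S2 hwf2 (by omega) hbase
    simp only [Nat.add_sub_cancel] at h3
    rw [pvCell_nn _ _ _ hk hv, h3 k.toNat v.toNat (by omega) (by omega),
      if_pos (le_refl _), Int.toNat_of_nonneg hv]
    rfl

-- ===== B side =====
def pvIter (ds : List Int) (v : Int) : Nat → PySem.Set Int → PySem.Set Int
  | 0, r => r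
  | n + 1, r => pvIter ds v n (pvStep ds v r)

lemma mem_innerFold (ds : List Int) (v x : Int) (y : Int) :
    ∀ acc : PySem.Set Int,
      (y ∈ ds.foldl (fun a d => if x + d ≤ v then PySem.Set.add a (x + d) else a) acc ↔
        y ∈ acc ∨ ∃ d ∈ ds, x + d = y ∧ x + d ≤ v) := by
  induction ds with
  | nil => intro acc; simp
  | cons d rest ih =>
    intro acc
    rw [List.foldl_cons, ih]
    by_cases h : x + d ≤ v
    · simp only [if_pos h, PySem.Set.mem_add, List.mem_cons]
      constructor
      · rintro (( hy | rfl) | ⟨d', hd', rfl, hle⟩)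
        · exact Or.inl hy
        · exact Or.inr ⟨d, Or.inl rfl, rfl, h⟩
        · exact Or.inr ⟨d', Or.inr hd', rfl, hle⟩
      · rintro (hy | ⟨d', (rfl | hd'), rfl, hle⟩)
        · exact Or.inl (Or.inl hy)
        · exact Or.inl (Or.inr rfl)
        · exact Or.inr ⟨d', hd', rfl, hle⟩
    · simp only [if_neg h, List.mem_cons]
      constructor
      · rintro (hy | ⟨d', hd', rfl, hle⟩)
        · exact Or.inl hy
        · exact Or.inr ⟨d', Or.inr hd', rfl, hle⟩
      · rintro (hy | ⟨d', (rfl | hd'), rfl, hle⟩)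
        · exact Or.inl hy
        · exact absurd hle h
        · exact Or.inr ⟨d', hd', rfl, hle⟩

lemma mem_outerFold (ds : List Int) (v : Int) (y : Int) :
    ∀ (l : List Int) (acc : PySem.Set Int),
      (y ∈ l.foldl (fun acc x =>
          ds.foldl (fun acc d => if x + d ≤ v then PySem.Set.add acc (x + d) else acc) acc) acc ↔
        y ∈ acc ∨ ∃ x ∈ l, ∃ d ∈ ds, x + d = y ∧ x + d ≤ v) := by
  intro l
  induction l with
  | nil => intro acc; simp
  | cons z rest ih =>
    intro acc
    rw [List.foldl_cons, ih, mem_innerFold]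
    constructor
    · rintro ((hy | ⟨d, hd, rfl, hle⟩) | ⟨x, hx, d, hd, rfl, hle⟩)
      · exact Or.inl hy
      · exact Or.inr ⟨z, List.mem_cons_self, d, hd, rfl, hle⟩
      · exact Or.inr ⟨x, List.mem_cons_of_mem _ hx, d, hd, rfl, hle⟩
    · rintro (hy | ⟨x, hx, d, hd, rfl, hle⟩)
      · exact Or.inl (Or.inl hy)
      · rcases List.mem_cons.mp hx with rfl | hx
        · exact Or.inl (Or.inr ⟨d, hd, rfl, hle⟩)
        · exact Or.inr ⟨x, hx, d, hd, rfl, hle⟩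

lemma mem_step (ds : List Int) (v : Int) (r : PySem.Set Int) (y : Int) :
    y ∈ pvStep ds v r ↔ y ∈ r ∨ ∃ x ∈ r, ∃ d ∈ ds, x + d = y ∧ x + d ≤ v := by
  unfold pvStep
  exact mem_outerFold ds v y r r

lemma innerFold_append (ds : List Int) (v x : Int) :
    ∀ acc : PySem.Set Int,
      ∃ t, ds.foldl (fun a d => if x + d ≤ v then PySem.Set.add a (x + d) else a) acc =
        acc ++ t := by
  induction ds with
  | nil => intro acc; exact ⟨[], by simp⟩
  | cons d rest ih =>
    intro acc
    rw [List.foldl_cons]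
    by_cases h : x + d ≤ v
    · rw [if_pos h, PySem.Set.add_eq_ite]
      by_cases hm : x + d ∈ acc
      · rw [if_pos hm]; exact ih acc
      · rw [if_neg hm]
        obtain ⟨t, ht⟩ := ih (acc ++ [x + d])
        exact ⟨[x + d] ++ t, by rw [ht, List.append_assoc]⟩
    · rw [if_neg h]; exact ih acc

lemma step_append (ds : List Int) (v : Int) (r : PySem.Set Int) :
    ∃ t, pvStep ds v r = r ++ t := by
  unfold pvStep
  have aux : ∀ (l : List Int) (acc : PySem.Set Int),
      ∃ t, l.foldl (fun acc x =>
        ds.foldl (fun acc d => if x + d ≤ v then PySem.Set.add acc (x + d) else acc) acc) acc =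
        acc ++ t := by
    intro l
    induction l with
    | nil => intro acc; exact ⟨[], by simp⟩
    | cons z rest ih =>
      intro acc
      rw [List.foldl_cons]
      obtain ⟨t1, ht1⟩ := innerFold_append ds v z acc
      obtain ⟨t2, ht2⟩ := ih (acc ++ t1)
      exact ⟨t1 ++ t2, by rw [ht1, ht2, List.append_assoc]⟩
  exact aux r r

lemma nodup_step (ds : List Int) (v : Int) (r : PySem.Set Int) (h : r.Nodup) :
    (pvStep ds v r).Nodup := by
  unfold pvStep
  have aux : ∀ (l : List Int) (acc : PySem.Set Int), acc.Nodup →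
      (l.foldl (fun acc x =>
        ds.foldl (fun acc d => if x + d ≤ v then PySem.Set.add acc (x + d) else acc) acc)
        acc).Nodup := by
    intro l
    induction l with
    | nil => exact fun acc h => h
    | cons z rest ih =>
      intro acc hacc
      rw [List.foldl_cons]
      refine ih _ ?_
      clear ih
      induction ds generalizing acc with
      | nil => exact hacc
      | cons d rest' ih' =>
        rw [List.foldl_cons]
        by_cases hc : z + d ≤ v
        · rw [if_pos hc]; exact ih' _ (PySem.Set.nodup_add _ _ hacc)
        · rw [if_neg hc]; exact ih' _ hacc
  exact aux r r h

lemma step_eq_of_len (ds : List Int) (v : Int) (r : PySem.Set Int)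
    (h : (pvStep ds v r).length = r.length) : pvStep ds v r = r := by
  obtain ⟨t, ht⟩ := step_append ds v r
  rw [ht] at h ⊢
  have : t = [] := by
    rw [List.length_append] at h
    exact List.eq_nil_of_length_eq_zero (by omega)
  simp [this]

lemma iter_fixed (ds : List Int) (v : Int) (r : PySem.Set Int) (h : pvStep ds v r = r) :
    ∀ n, pvIter ds v n r = r := by
  intro n
  induction n with
  | zero => rfl
  | succ n ih => rw [pvIter, h]; exact ih

lemma mem_iter_of_mem (ds : List Int) (v y : Int) :
    ∀ (n : Nat) (r : PySem.Set Int), y ∈ r → y ∈ pvIter ds v n r := by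
  intro n
  induction n with
  | zero => exact fun r h => h
  | succ n ih => exact fun r h => ih _ ((mem_step ds v r y).mpr (Or.inl h))

lemma contains_decide (r : PySem.Set Int) (y : Int) :
    PySem.Set.contains r y = decide (y ∈ r) := by
  by_cases h : y ∈ r
  · rw [decide_eq_true h, (PySem.Set.contains_iff r y).mpr h]
  · rw [decide_eq_false h]
    by_contra hc
    exact h ((PySem.Set.contains_iff r y).mp (by
      cases hcc : PySem.Set.contains r y
      · exact absurd hcc hc
      · rfl))

lemma pvLoop_eq (ds : List Int) (v : Int) :
    ∀ (n : Nat) (r : PySem.Set Int), r.Nodup →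
      pvLoop ds v n r = decide (v ∈ pvIter ds v n r) := by
  intro n
  induction n with
  | zero => intro r _; rw [pvLoop, pvIter, contains_decide]
  | succ n ih =>
    intro r hnd
    rw [pvLoop]
    by_cases h : PySem.Set.contains r v = true
    · rw [if_pos h]
      have hv : v ∈ r := (PySem.Set.contains_iff r v).mp h
      have : v ∈ pvIter ds v (n + 1) r :=
        mem_iter_of_mem ds v v n _ ((mem_step ds v r v).mpr (Or.inl hv))
      rw [decide_eq_true this]
    · rw [if_neg h]
      by_cases hl : (pvStep ds v r).length = r.length
      · rw [if_pos hl]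
        have hfix := step_eq_of_len ds v r hl
        have : pvIter ds v (n + 1) r = r := by
          rw [pvIter, hfix]; exact iter_fixed ds v r hfix n
        rw [this, contains_decide]
      · rw [if_neg hl]
        show pvLoop ds v n (pvStep ds v r) = _
        rw [ih _ (nodup_step ds v r hnd), pvIter]

lemma pvIter_succ' (ds : List Int) (v : Int) :
    ∀ (n : Nat) (r : PySem.Set Int),
      pvIter ds v (n + 1) r = pvStep ds v (pvIter ds v n r) := by
  intro n
  induction n with
  | zero => intro r; rfl
  | succ n ih =>
    intro r
    rw [pvIter, ih, pvIter]

lemma pvRec_mono (ds : List Int) :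
    ∀ (n : Nat) (j : Int), pvRec ds n j = true → pvRec ds (n + 1) j = true := by
  intro n
  induction n with
  | zero =>
    intro j h
    simp only [pvRec] at h ⊢
    rw [if_pos h]
  | succ n ih =>
    intro j h
    simp only [pvRec] at h ⊢
    by_cases h0 : (j == 0) = true
    · rw [if_pos h0]
    · rw [if_neg h0]
      rw [if_neg h0] at h
      obtain ⟨d, hd, hc⟩ := List.any_eq_true.mp h
      rw [Bool.and_eq_true] at hc
      exact List.any_eq_true.mpr ⟨d, hd, by rw [Bool.and_eq_true]; exact ⟨hc.1, ih _ hc.2⟩⟩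

lemma mem_iter_iff (ds : List Int) (v : Int) (hd : ∀ d ∈ ds, 0 ≤ d) (hv : 0 ≤ v) :
    ∀ (n : Nat) (j : Int),
      j ∈ pvIter ds v n (PySem.Set.ofList [0]) ↔ 0 ≤ j ∧ j ≤ v ∧ pvRec ds n j = true := by
  intro n
  induction n with
  | zero =>
    intro j
    rw [pvIter, PySem.Set.mem_ofList]
    simp only [List.mem_singleton, pvRec]
    constructor
    · rintro rfl; exact ⟨le_refl 0, hv, by simp⟩
    · rintro ⟨h1, h2, h3⟩; exact beq_iff_eq.mp h3
  | succ n ih =>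
    intro j
    rw [pvIter_succ', mem_step]
    constructor
    · rintro (hj | ⟨x, hx, d, hdm, rfl, hle⟩)
      · obtain ⟨h1, h2, h3⟩ := (ih j).mp hj
        exact ⟨h1, h2, pvRec_mono ds n j h3⟩
      · obtain ⟨hx0, hxv, hxr⟩ := (ih x).mp hx
        have hd0 : 0 ≤ d := hd d hdm
        refine ⟨by omega, hle, ?_⟩
        simp only [pvRec]
        by_cases h0 : (x + d == 0) = true
        · rw [if_pos h0]
        · rw [if_neg h0]
          refine List.any_eq_true.mpr ⟨d, hdm, ?_⟩
          rw [Bool.and_eq_true]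
          refine ⟨decide_eq_true (by omega), ?_⟩
          rw [show x + d - d = x by ring]
          exact hxr
    · rintro ⟨h1, h2, h3⟩
      simp only [pvRec] at h3
      by_cases h0 : (j == 0) = true
      · left
        have hj0 : j = 0 := beq_iff_eq.mp h0
        subst hj0
        exact (ih 0).mpr ⟨le_refl 0, hv, pvRec_zero_val ds n⟩
      · rw [if_neg h0] at h3
        obtain ⟨d, hdm, hc⟩ := List.any_eq_true.mp h3
        rw [Bool.and_eq_true] at hc
        have hdj : d ≤ j := of_decide_eq_true hc.1
        have hd0 : 0 ≤ d := hd d hdm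
        right
        exact ⟨j - d, (ih (j - d)).mpr ⟨by omega, by omega, hc.2⟩, d, hdm,
          by ring, by omega⟩

lemma B_eq (ds : List Int) (k v : Int) (hk : 0 ≤ k) (hv : 0 ≤ v)
    (hd : k = 0 ∨ v = 0 ∨ ∀ d ∈ ds, 0 ≤ d) :
    solution_alt (ds, k, v) = pvRec ds k.toNat v := by
  show pvLoop ds v k.toNat (PySem.Set.ofList [0]) = pvRec ds k.toNat v
  rcases hd with h | h | h
  · subst h
    rw [show ((0 : Int)).toNat = 0 from rfl, pvLoop, contains_decide]
    by_cases h : v = 0 <;> simp [h, PySem.Set.mem_ofList, pvRec]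
  · subst h
    rw [pvRec_zero_val]
    cases hk' : k.toNat with
    | zero => rw [pvLoop, contains_decide]; simp [PySem.Set.mem_ofList]
    | succ n =>
      rw [pvLoop]
      rw [if_pos (by rw [contains_decide]; simp [PySem.Set.mem_ofList])]
  · rw [pvLoop_eq ds v k.toNat _ (PySem.Set.nodup_ofList [0])]
    by_cases hr : pvRec ds k.toNat v = true
    · rw [hr, decide_eq_true ((mem_iter_iff ds v h hv k.toNat v).mpr ⟨hv, le_refl v, hr⟩)]
    · have hnm : ¬ v ∈ pvIter ds v k.toNat (PySem.Set.ofList [0]) := fun hm =>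
        hr ((mem_iter_iff ds v h hv k.toNat v).mp hm).2.2
      rw [decide_eq_false hnm, Bool.not_eq_true] at *
      rw [hr]

-- ===== VERDICT (by name: the statement is the Claim_ definition above) =====
theorem solution_spec : Claim_equal_solution := by
  intro args _ hpre
  obtain ⟨ds, k, v⟩ := args
  obtain ⟨hk, hv, hd⟩ := hpre
  unfold Spec_solution
  rw [A_eq ds k v hk hv hd, B_eq ds k v hk hv hd]
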